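-- pv_equiv track=rewrite | github.com/de-ritchie/dsa_python | src/dp/dimension_1/d_byte_landian.py | bytelandian_recurs
-- ===== SOURCE A (Python) =====
-- def bytelandian_recurs(n) :
-- 	# Write your code here
--
--     if n == 0:
--         return 0
--
--     d1 = n//2
--     d2 = n//3
--     d3 = n//4
--
--     d1 = max(bytelandian_recurs(d1), d1)
--     d2 = max(bytelandian_recurs(d2), d2)
--     d3 = max(bytelandian_recurs(d3), d3)
--
--     return max(d1 + d2 + d3, n)
-- ===== SOURCE B (Python) =====
-- def bytelandian_recurs(n):
--     # Memoized DP over the distinct reachable subproblems n//2, n//3, n//4, ...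
--     # Uses the simplified recurrence f(n) = max(f(n//2)+f(n//3)+f(n//4), n),
--     # valid since f(m) >= m for every m >= 0.
--     memo = {0: 0}
--
--     def best(m):
--         if m in memo:
--             return memo[m]
--         v = max(best(m // 2) + best(m // 3) + best(m // 4), m)
--         memo[m] = v
--         return v
--
--     return best(n)
-- ===== Notes on version B (the rewrite author's own statement) =====
-- stated objective: faster
-- what changed: Replaced the exponential plain recursion with memoization over the distinct reachable subproblems, using the simplified recurrence f(n)=max(f(n//2)+f(n//3)+f(n//4), n) (the inner max(f(d),d) is redundant since f(d)>=d).
import Mathlib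
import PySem

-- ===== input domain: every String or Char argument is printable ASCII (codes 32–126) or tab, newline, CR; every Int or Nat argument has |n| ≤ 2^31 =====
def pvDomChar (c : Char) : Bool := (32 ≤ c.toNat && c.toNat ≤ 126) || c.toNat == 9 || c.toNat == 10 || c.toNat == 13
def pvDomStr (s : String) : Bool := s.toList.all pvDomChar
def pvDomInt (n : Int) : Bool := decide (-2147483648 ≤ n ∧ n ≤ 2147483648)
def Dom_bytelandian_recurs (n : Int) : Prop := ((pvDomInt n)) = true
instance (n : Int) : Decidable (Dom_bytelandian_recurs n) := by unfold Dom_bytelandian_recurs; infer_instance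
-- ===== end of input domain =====

-- B replaces A's exponential plain recursion by memoization over the distinct reachable
-- subproblems (objective: faster, asymptotically fewer recursive calls).

-- ===== PORT A =====
-- A's recursion, on the nonnegative domain (Nat division = Python's // on nonnegatives).
def pyRecA (n : Nat) : Nat :=
  if h : n = 0 then 0
  else
    let d1 := n / 2
    let d2 := n / 3
    let d3 := n / 4
    let e1 := max (pyRecA d1) d1
    let e2 := max (pyRecA d2) d2
    let e3 := max (pyRecA d3) d3
    max (e1 + e2 + e3) n
termination_by n
decreasing_by
  · exact Nat.div_lt_self (Nat.pos_of_ne_zero h) (by norm_num)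
  · exact Nat.div_lt_self (Nat.pos_of_ne_zero h) (by norm_num)
  · exact Nat.div_lt_self (Nat.pos_of_ne_zero h) (by norm_num)

-- For n < 0 the Python recursion never terminates (n//2 has fixed point -1);
-- Pre_ excludes those inputs, the guard below only totalizes the Lean function.
def bytelandian_recurs (n : Int) : Int :=
  if n < 0 then 0 else (pyRecA n.toNat : Int)

-- ===== PORT B =====
-- B's memoized `best`: the memo dict is threaded through explicitly.
-- The `n = 0` branch is a totalizing guard: in B the memo always contains key 0
-- (it is initialized to {0: 0}), so that branch is unreachable at B's call sites.
def pyRecB (n : Nat) (memo : PySem.Dict Nat Nat) : Nat × PySem.Dict Nat Nat :=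
  match memo.get? n with
  | some v => (v, memo)
  | none =>
    if h : n = 0 then (0, memo)
    else
      let r1 := pyRecB (n / 2) memo
      let r2 := pyRecB (n / 3) r1.2
      let r3 := pyRecB (n / 4) r2.2
      let v := max (r1.1 + r2.1 + r3.1) n
      (v, r3.2.insert n v)
termination_by n
decreasing_by
  · exact Nat.div_lt_self (Nat.pos_of_ne_zero h) (by norm_num)
  · exact Nat.div_lt_self (Nat.pos_of_ne_zero h) (by norm_num)
  · exact Nat.div_lt_self (Nat.pos_of_ne_zero h) (by norm_num)

def bytelandian_recurs_alt (n : Int) : Int :=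
  if n < 0 then 0
  else ((pyRecB n.toNat ((PySem.Dict.empty : PySem.Dict Nat Nat).insert 0 0)).1 : Int)

-- ===== PRECONDITION & SPEC =====
-- Pre_ excludes n < 0, where Python A never returns (infinite recursion, as n//2 = -1 is
-- a fixed point for negative n; RecursionError).
def Pre_bytelandian_recurs (n : Int) : Prop := 0 ≤ n
instance (n : Int) : Decidable (Pre_bytelandian_recurs n) := by unfold Pre_bytelandian_recurs; infer_instance
def pvWitness_bytelandian_recurs : Int := (12)

def Spec_bytelandian_recurs (n : Int) (out : Int) : Prop := out = bytelandian_recurs_alt n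
instance (n : Int) (out : Int) : Decidable (Spec_bytelandian_recurs n out) := by unfold Spec_bytelandian_recurs; infer_instance

-- ===== CLAIM (what is proved, stated in full; the proofs are below) =====
def Claim_equal_bytelandian_recurs : Prop := ∀ (n : Int), Dom_bytelandian_recurs n → Pre_bytelandian_recurs n → Spec_bytelandian_recurs n (bytelandian_recurs n)

-- ===== LEMMAS AND PROOFS =====

-- A's value dominates its argument.
theorem pyRecA_ge (n : Nat) : n ≤ pyRecA n := by
  rw [pyRecA]
  split
  · omega
  · exact le_max_right _ _

-- A satisfies the simplified recurrence B uses (the inner max is redundant).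
theorem pyRecA_eq (n : Nat) (h : n ≠ 0) :
    pyRecA n = max (pyRecA (n / 2) + pyRecA (n / 3) + pyRecA (n / 4)) n := by
  conv_lhs => rw [pyRecA]
  simp only [dif_neg h]
  rw [Nat.max_eq_left (pyRecA_ge (n / 2)), Nat.max_eq_left (pyRecA_ge (n / 3)),
      Nat.max_eq_left (pyRecA_ge (n / 4))]

-- memo invariant: every stored value is the true (A's) value of its key.
def GoodMemo (memo : PySem.Dict Nat Nat) : Prop :=
  ∀ k v, memo.get? k = some v → v = pyRecA k

theorem pyRecB_correct : ∀ (n : Nat) (memo : PySem.Dict Nat Nat), GoodMemo memo →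
    (pyRecB n memo).1 = pyRecA n ∧ GoodMemo (pyRecB n memo).2 := by
  intro n
  induction n using Nat.strong_induction_on with
  | _ n ih =>
    intro memo hg
    rw [pyRecB]
    cases hget : memo.get? n with
    | some v =>
      simp only
      exact ⟨hg n v hget, hg⟩
    | none =>
      simp only
      by_cases h0 : n = 0
      · subst h0
        refine ⟨?_, ?_⟩
        · simp [pyRecA]
        · simpa using hg
      · simp only [dif_neg h0]
        have hlt2 : n / 2 < n := Nat.div_lt_self (Nat.pos_of_ne_zero h0) (by norm_num)
        have hlt3 : n / 3 < n := Nat.div_lt_self (Nat.pos_of_ne_zero h0) (by norm_num)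
        have hlt4 : n / 4 < n := Nat.div_lt_self (Nat.pos_of_ne_zero h0) (by norm_num)
        obtain ⟨h1v, h1g⟩ := ih (n / 2) hlt2 memo hg
        obtain ⟨h2v, h2g⟩ := ih (n / 3) hlt3 _ h1g
        obtain ⟨h3v, h3g⟩ := ih (n / 4) hlt4 _ h2g
        refine ⟨?_, ?_⟩
        · simp only [h1v, h2v, h3v]
          exact (pyRecA_eq n h0).symm
        · intro k v hk
          rw [PySem.Dict.get?_insert] at hk
          split_ifs at hk with hk'
          · cases hk
            rw [hk']
            simp only [h1v, h2v, h3v]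
            exact (pyRecA_eq n h0).symm
          · exact h3g k v hk

theorem initMemo_good : GoodMemo ((PySem.Dict.empty : PySem.Dict Nat Nat).insert 0 0) := by
  intro k v hk
  rw [PySem.Dict.get?_insert] at hk
  split_ifs at hk with hk'
  · cases hk; subst hk'; simp [pyRecA]
  · rw [PySem.Dict.get?_empty] at hk; cases hk

-- ===== VERDICT (by name: the statement is the Claim_ definition above) =====
theorem bytelandian_recurs_spec : Claim_equal_bytelandian_recurs := by
  intro n _ hpre
  unfold Spec_bytelandian_recurs bytelandian_recurs bytelandian_recurs_alt
  have hnlt : ¬ n < 0 := by exact not_lt.mpr hpre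
  rw [if_neg hnlt, if_neg hnlt,
      (pyRecB_correct n.toNat _ initMemo_good).1]
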